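-- pv_equiv track=rewrite | github.com/sorryhyun/anima_lora | gui/image_tab.py | _tag_ranges
-- ===== SOURCE A (Python) =====
-- def _tag_ranges(text: str):
--     """Yield ``(start, end, tag_text)`` for each comma-separated, trimmed tag.
--
--     Whitespace around each tag is excluded from the range so the painted box
--     hugs the visible characters, not the surrounding spaces.
--     """
--     i = 0
--     n = len(text)
--     while i < n:
--         while i < n and text[i] in " \t\n":
--             i += 1
--         start = i
--         while i < n and text[i] != ",":
--             i += 1
--         end = i
--         while end > start and text[end - 1] in " \t\n":
--             end -= 1
--         if end > start:
--             yield (start, end, text[start:end])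
--         if i < n and text[i] == ",":
--             i += 1
-- ===== SOURCE B (Python) =====
-- def _tag_ranges(text: str):
--     """Yield ``(start, end, tag_text)`` for each comma-separated, trimmed tag.
--
--     Tokenize-first variant: split on ',' and keep a running offset instead of
--     scanning character by character.  Trimming uses the explicit set " \t\n"
--     (not str.strip) to match the visible-character semantics.
--     """
--     pos = 0
--     for seg in text.split(','):
--         lo = 0
--         hi = len(seg)
--         while lo < hi and seg[lo] in " \t\n":
--             lo += 1
--         while hi > lo and seg[hi - 1] in " \t\n":
--             hi -= 1
--         if hi > lo:
--             yield (pos + lo, pos + hi, seg[lo:hi])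
--         pos += len(seg) + 1
-- ===== Notes on version B (the rewrite author's own statement) =====
-- stated objective: simpler
-- what changed: B tokenizes the text once with str.split on the comma separator and walks the resulting segments with a running character offset, trimming each segment locally, instead of A's character-by-character scanner with four nested while loops over absolute indices; the split runs at C speed, so B was also measured faster.
import Mathlib
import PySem

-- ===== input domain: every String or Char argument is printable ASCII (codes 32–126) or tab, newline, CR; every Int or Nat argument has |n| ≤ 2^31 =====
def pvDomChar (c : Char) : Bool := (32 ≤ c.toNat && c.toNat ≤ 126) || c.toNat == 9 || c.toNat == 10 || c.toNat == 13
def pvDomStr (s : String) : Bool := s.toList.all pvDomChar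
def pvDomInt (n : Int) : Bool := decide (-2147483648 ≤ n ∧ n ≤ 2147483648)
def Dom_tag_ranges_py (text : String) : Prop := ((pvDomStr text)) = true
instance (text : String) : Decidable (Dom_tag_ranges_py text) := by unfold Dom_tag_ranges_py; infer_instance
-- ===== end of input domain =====

-- B replaces A's single character-by-character scanner by a split-on-comma pass with a running
-- offset; same yielded triples (both sides are compared as the list of yields). Objective: simpler.

-- ===== PORT A =====
-- `c in " \t\n"`
def pvWs (c : Char) : Bool := c == ' ' || c == '\t' || c == '\n'

-- `while i < n and text[i] in " \t\n": i += 1` over the remaining suffix, tracking i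
def pvSkipA : List Char → Nat → (List Char × Nat)
  | [], i => ([], i)
  | c :: cs, i => if pvWs c then pvSkipA cs (i + 1) else (c :: cs, i)

-- `while i < n and text[i] != ",": i += 1`; collects the scanned chars (= text[start:end0])
def pvScanA : List Char → Nat → (List Char × List Char × Nat)
  | [], i => ([], [], i)
  | c :: cs, i =>
    if c = ',' then ([], c :: cs, i)
    else
      let r := pvScanA cs (i + 1)
      (c :: r.1, r.2.1, r.2.2)

-- `while end > start and text[end-1] in " \t\n": end -= 1`, rendered as structural recursion
-- from the right over the scanned segment (text[start:end] is then exactly the trimmed segment)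
def pvTrimA : List Char → List Char
  | [] => []
  | c :: cs =>
    match pvTrimA cs with
    | [] => if pvWs c then [] else [c]
    | t => c :: t

theorem pvSkipA_len : ∀ (cs : List Char) (i : Nat), (pvSkipA cs i).1.length ≤ cs.length := by
  intro cs
  induction cs with
  | nil => intro i; simp [pvSkipA]
  | cons c cs ih =>
    intro i
    by_cases h : pvWs c
    · simpa [pvSkipA, h] using Nat.le_succ_of_le (ih (i + 1))
    · simp [pvSkipA, h]

theorem pvScanA_len : ∀ (cs : List Char) (i : Nat), (pvScanA cs i).2.1.length ≤ cs.length := by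
  intro cs
  induction cs with
  | nil => intro i; simp [pvScanA]
  | cons c cs ih =>
    intro i
    by_cases h : c = ','
    · simp [pvScanA, h]
    · simpa [pvScanA, h] using Nat.le_succ_of_le (ih (i + 1))

-- the outer `while i < n` loop of A
def pvLoopA : List Char → Nat → List (Int × Int × String)
  | [], _ => []
  | c0 :: cs0, i =>
    let p := pvSkipA (c0 :: cs0) i   -- start := p.2
    let q := pvScanA p.1 p.2         -- end0 := q.2.2, scanned := q.1, rest := q.2.1
    let t := pvTrimA q.1             -- end := p.2 + t.length, text[start:end] = t
    let out : List (Int × Int × String) :=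
      if 0 < t.length then [((p.2 : Int), ((p.2 + t.length : Nat) : Int), String.ofList t)] else []
    match h2 : q.2.1 with
    | ',' :: r' => out ++ pvLoopA r' (q.2.2 + 1)
    | _ => out
termination_by cs _ => cs.length
decreasing_by
  have h1 := pvSkipA_len (c0 :: cs0) i
  have h3 := pvScanA_len (pvSkipA (c0 :: cs0) i).1 (pvSkipA (c0 :: cs0) i).2
  rw [h2] at h3
  simp at h1 h3 ⊢
  omega

def tag_ranges_py (text : String) : List (Int × Int × String) := pvLoopA text.toList 0

-- ===== PORT B =====
-- `while lo < hi and seg[lo] in " \t\n": lo += 1` : count of leading whitespace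
def pvLoB : List Char → Nat
  | [] => 0
  | c :: cs => if pvWs c then pvLoB cs + 1 else 0

-- loop over the segments of text.split(',') with a running offset pos; the `hi` loop is a
-- right trim of seg.drop lo (its head is non-ws, so the `hi > lo` bound is never the stopper),
-- and seg[lo:hi] is exactly the trimmed list
def pvLoopB : List (List Char) → Nat → List (Int × Int × String)
  | [], _ => []
  | seg :: rest, pos =>
    let lo := pvLoB seg
    let t := ((seg.drop lo).reverse.dropWhile pvWs).reverse
    (if 0 < t.length then [(((pos + lo : Nat) : Int), ((pos + lo + t.length : Nat) : Int), String.ofList t)] else [])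
      ++ pvLoopB rest (pos + seg.length + 1)

-- text.split(',') : the separator is nonempty, so Str.split? text "," = some of exactly this
def tag_ranges_py_alt (text : String) : List (Int × Int × String) :=
  pvLoopB (PySem.Chars.splitOn text.toList [',']) 0

-- ===== PRECONDITION & SPEC =====
def Spec_tag_ranges_py (text : String) (out : List (Int × Int × String)) : Prop := out = tag_ranges_py_alt text
instance (text : String) (out : List (Int × Int × String)) : Decidable (Spec_tag_ranges_py text out) := by unfold Spec_tag_ranges_py; infer_instance

-- ===== CLAIM (what is proved, stated in full; the proofs are below) =====
def Claim_equal_tag_ranges_py : Prop := ∀ (text : String), Dom_tag_ranges_py text → Spec_tag_ranges_py text (tag_ranges_py text)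

-- ===== LEMMAS AND PROOFS =====

-- reference split on ',': comma-free prefix, then recurse past the first comma
def pvSplitC (cs : List Char) : List (List Char) :=
  let s := cs.takeWhile (fun c => !(c == ','))
  match h2 : cs.dropWhile (fun c => !(c == ',')) with
  | [] => [s]
  | _ :: r' => s :: pvSplitC r'
termination_by cs.length
decreasing_by
  have hlen := congrArg List.length (cs.takeWhile_append_dropWhile (p := fun c => !(c == ',')))
  rw [List.length_append, h2] at hlen
  simp at hlen
  omega

theorem pvSplitC_ne_nil (cs : List Char) : pvSplitC cs ≠ [] := by
  rw [pvSplitC]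
  split <;> simp

theorem pvSplitC_nil_case (cs : List Char)
    (h : cs.dropWhile (fun c => !(c == ',')) = []) :
    pvSplitC cs = [cs.takeWhile (fun c => !(c == ','))] := by
  rw [pvSplitC]
  split
  · rfl
  · next h2 => rw [h] at h2; simp at h2

theorem pvSplitC_cons_case (cs : List Char) (x : Char) (r' : List Char)
    (h : cs.dropWhile (fun c => !(c == ',')) = x :: r') :
    pvSplitC cs = cs.takeWhile (fun c => !(c == ',')) :: pvSplitC r' := by
  rw [pvSplitC]
  split
  · next h2 => rw [h] at h2; simp at h2
  · next h2 =>
      rw [h] at h2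
      injection h2 with h3 h4
      rw [h4]

theorem pvSplitC_comma (rest : List Char) :
    pvSplitC (',' :: rest) = [] :: pvSplitC rest := by
  rw [pvSplitC_cons_case (',' :: rest) ',' rest (by simp [List.dropWhile_cons])]
  simp [List.takeWhile_cons]

theorem pvSplitC_not_comma (c : Char) (rest : List Char) (h : ¬ c = ',') :
    pvSplitC (c :: rest) = (pvSplitC rest).modifyHead (c :: ·) := by
  have hb : (c == ',') = false := by simpa using h
  rcases hr : rest.dropWhile (fun c => !(c == ',')) with _ | ⟨x, r'⟩
  · rw [pvSplitC_nil_case rest hr, pvSplitC_nil_case (c :: rest) (by simp [List.dropWhile_cons, hb, hr])]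
    simp [List.takeWhile_cons, hb]
  · rw [pvSplitC_cons_case rest x r' hr, pvSplitC_cons_case (c :: rest) x r' (by simp [List.dropWhile_cons, hb, hr])]
    simp [List.takeWhile_cons, hb]

theorem pvGo_nil (f : Nat) (cur : List Char) (acc : List (List Char)) :
    PySem.Chars.splitOn.go [','] (f + 1) [] cur acc = (cur.reverse :: acc).reverse := by
  simp [PySem.Chars.splitOn.go]

theorem pvGo_step_comma (f : Nat) (rest cur : List Char) (acc : List (List Char)) :
    PySem.Chars.splitOn.go [','] (f + 1) (',' :: rest) cur acc
      = PySem.Chars.splitOn.go [','] f rest [] (cur.reverse :: acc) := by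
  simp [PySem.Chars.splitOn.go, List.isPrefixOf]

theorem pvGo_step_other (f : Nat) (c : Char) (rest cur : List Char) (acc : List (List Char))
    (h : ¬ c = ',') :
    PySem.Chars.splitOn.go [','] (f + 1) (c :: rest) cur acc
      = PySem.Chars.splitOn.go [','] f rest (c :: cur) acc := by
  simp [PySem.Chars.splitOn.go, List.isPrefixOf, Ne.symm h]

theorem pvGo_comma : ∀ (fuel : Nat) (l cur : List Char) (acc : List (List Char)),
    l.length < fuel →
    PySem.Chars.splitOn.go [','] fuel l cur acc
      = acc.reverse ++ (pvSplitC l).modifyHead (cur.reverse ++ ·) := by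
  intro fuel
  induction fuel with
  | zero => intro l cur acc h; omega
  | succ f ih =>
    intro l cur acc h
    match l with
    | [] =>
      rw [pvSplitC, pvGo_nil]
      simp [List.dropWhile]
    | c :: rest =>
      have hrest : rest.length < f := by simpa using Nat.lt_of_succ_lt_succ h
      by_cases hc : c = ','
      · subst hc
        rw [pvGo_step_comma, ih rest [] (cur.reverse :: acc) hrest, pvSplitC_comma]
        obtain ⟨hh, tl, hsp⟩ := List.exists_cons_of_ne_nil (pvSplitC_ne_nil rest)
        simp [hsp]
      · rw [pvGo_step_other _ _ _ _ _ hc, ih rest (c :: cur) acc hrest,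
          pvSplitC_not_comma _ _ hc]
        obtain ⟨hh, tl, hsp⟩ := List.exists_cons_of_ne_nil (pvSplitC_ne_nil rest)
        simp [hsp]

theorem pvSplitOn_comma (cs : List Char) :
    PySem.Chars.splitOn cs [','] = pvSplitC cs := by
  have := pvGo_comma (cs.length + 1) cs [] [] (Nat.lt_succ_self _)
  rw [PySem.Chars.splitOn, this]
  obtain ⟨hh, tl, hsp⟩ := List.exists_cons_of_ne_nil (pvSplitC_ne_nil cs)
  simp [hsp]

-- characterizations of the loop helpers
theorem pvSkipA_eq (cs : List Char) (i : Nat) :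
    pvSkipA cs i = (cs.dropWhile pvWs, i + (cs.takeWhile pvWs).length) := by
  induction cs generalizing i with
  | nil => simp [pvSkipA, List.takeWhile, List.dropWhile]
  | cons c cs ih =>
    by_cases h : pvWs c
    · simp [pvSkipA, List.takeWhile_cons, List.dropWhile_cons, h, ih]
      omega
    · simp [pvSkipA, List.takeWhile_cons, List.dropWhile_cons, h]

theorem pvScanA_eq (cs : List Char) (i : Nat) :
    pvScanA cs i = (cs.takeWhile (fun c => !(c == ',')),
      cs.dropWhile (fun c => !(c == ',')),
      i + (cs.takeWhile (fun c => !(c == ','))).length) := by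
  induction cs generalizing i with
  | nil => simp [pvScanA, List.takeWhile, List.dropWhile]
  | cons c cs ih =>
    by_cases h : c = ','
    · simp [pvScanA, List.takeWhile_cons, List.dropWhile_cons, h]
    · simp [pvScanA, List.takeWhile_cons, List.dropWhile_cons, h, ih]
      omega

theorem pvTrimA_eq (l : List Char) : pvTrimA l = (l.reverse.dropWhile pvWs).reverse := by
  induction l with
  | nil => simp [pvTrimA]
  | cons c cs ih =>
    rw [pvTrimA, ih]
    rcases hd : cs.reverse.dropWhile pvWs with _ | ⟨x, xs⟩
    · by_cases h : pvWs c <;>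
        simp [List.dropWhile_append, hd, List.dropWhile_cons, h]
    · simp [List.dropWhile_append, hd]

theorem pvLoB_eq (cs : List Char) : pvLoB cs = (cs.takeWhile pvWs).length := by
  induction cs with
  | nil => simp [pvLoB, List.takeWhile]
  | cons c cs ih => by_cases h : pvWs c <;> simp [pvLoB, List.takeWhile_cons, h, ih]

theorem drop_takeWhile_len (l : List Char) (p : Char → Bool) :
    l.drop (l.takeWhile p).length = l.dropWhile p := by
  induction l with
  | nil => simp
  | cons c cs ih => by_cases h : p c <;> simp [List.takeWhile_cons, List.dropWhile_cons, h, ih]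

-- dropWhile p then dropWhile q collapses when p implies q
theorem dropWhile_dropWhile (p q : Char → Bool) (hpq : ∀ c, p c = true → q c = true)
    (l : List Char) : (l.dropWhile p).dropWhile q = l.dropWhile q := by
  induction l with
  | nil => simp
  | cons c cs ih =>
    by_cases h : p c
    · simp [List.dropWhile_cons, h, hpq c h, ih]
    · simp [List.dropWhile_cons, h]

theorem takeWhile_takeWhile (p q : Char → Bool) (hpq : ∀ c, p c = true → q c = true)
    (l : List Char) : (l.takeWhile q).takeWhile p = l.takeWhile p := by
  induction l with
  | nil => simp
  | cons c cs ih =>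
    by_cases hq : q c
    · simp [List.takeWhile_cons, hq, ih]
    · have hp : p c = false := by
        cases hh : p c
        · rfl
        · exact absurd (hpq c hh) (by simp [hq])
      simp [List.takeWhile_cons, hq, hp]

theorem dropWhile_takeWhile_comm (p q : Char → Bool) (hpq : ∀ c, p c = true → q c = true)
    (l : List Char) : (l.takeWhile q).dropWhile p = (l.dropWhile p).takeWhile q := by
  induction l with
  | nil => simp
  | cons c cs ih =>
    by_cases hp : p c
    · simp [List.takeWhile_cons, List.dropWhile_cons, hp, hpq c hp, ih]
    · by_cases hq : q c
      · simp [List.takeWhile_cons, List.dropWhile_cons, hp, hq]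
      · simp [List.takeWhile_cons, List.dropWhile_cons, hp, hq]

theorem takeWhile_split (p q : Char → Bool) (hpq : ∀ c, p c = true → q c = true)
    (l : List Char) : l.takeWhile q = l.takeWhile p ++ (l.dropWhile p).takeWhile q := by
  induction l with
  | nil => simp
  | cons c cs ih =>
    by_cases hp : p c
    · simp [List.takeWhile_cons, List.dropWhile_cons, hp, hpq c hp, ih]
    · simp [List.takeWhile_cons, List.dropWhile_cons, hp]

theorem pvWs_nc (c : Char) (h : pvWs c = true) : (!(c == ',')) = true := by
  by_cases hc : c = ','
  · subst hc; exact absurd h (by decide)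
  · simp [hc]

theorem dropWhile_head_false (p : Char → Bool) (l r : List Char) (x : Char)
    (h : l.dropWhile p = x :: r) : p x = false := by
  induction l with
  | nil => simp at h
  | cons c cs ih =>
    rw [List.dropWhile_cons] at h
    split at h
    · exact ih h
    · next hc => injection h with h1 h2; subst h1; simpa using hc

theorem drop_len_takeWhile_comm (p q : Char → Bool) (hpq : ∀ c, p c = true → q c = true)
    (l : List Char) :
    (l.takeWhile q).drop (l.takeWhile p).length = (l.dropWhile p).takeWhile q := by
  rw [← takeWhile_takeWhile p q hpq l, drop_takeWhile_len, dropWhile_takeWhile_comm p q hpq]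

-- A's outer-loop step, written in terms of takeWhile/dropWhile
theorem pvLoopA_step (c0 : Char) (cs0 : List Char) (i : Nat) :
    pvLoopA (c0 :: cs0) i =
      (let t := pvTrimA (((c0 :: cs0).dropWhile pvWs).takeWhile (fun c => !(c == ',')))
       if 0 < t.length then
         [(((i + ((c0 :: cs0).takeWhile pvWs).length : Nat) : Int),
           ((i + ((c0 :: cs0).takeWhile pvWs).length + t.length : Nat) : Int),
           String.ofList t)]
       else [])
      ++ (match ((c0 :: cs0).dropWhile pvWs).dropWhile (fun c => !(c == ',')) with
          | ',' :: r' => pvLoopA r'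
              (i + ((c0 :: cs0).takeWhile pvWs).length
                 + (((c0 :: cs0).dropWhile pvWs).takeWhile (fun c => !(c == ','))).length + 1)
          | _ => [])
      := by
  rw [pvLoopA]
  split
  · next r' heq =>
      have hd : ((c0 :: cs0).dropWhile pvWs).dropWhile (fun c => !(c == ',')) = ',' :: r' := by
        simpa [pvSkipA_eq, pvScanA_eq] using heq
      rw [hd]
      simp [pvSkipA_eq, pvScanA_eq]
  · next heq =>
      have hd : ((c0 :: cs0).dropWhile pvWs).dropWhile (fun c => !(c == ',')) = [] := by
        rcases hdd : ((c0 :: cs0).dropWhile pvWs).dropWhile (fun c => !(c == ',')) with _ | ⟨x, r2⟩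
        · rfl
        · exfalso
          have hx : (!(x == ',')) = false := dropWhile_head_false _ _ _ _ hdd
          have hx' : x = ',' := by simpa using hx
          subst hx'
          have : (pvScanA (pvSkipA (c0 :: cs0) i).1 (pvSkipA (c0 :: cs0) i).2).2.1 = ',' :: r2 := by
            simpa [pvSkipA_eq, pvScanA_eq] using hdd
          exact heq r2 this
      rw [hd]
      simp [pvSkipA_eq, pvScanA_eq]

theorem pvMain : ∀ (n : Nat) (cs : List Char), cs.length ≤ n → ∀ i,
    pvLoopA cs i = pvLoopB (pvSplitC cs) i := by
  intro n
  induction n with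
  | zero =>
    intro cs h i
    have hcs : cs = [] := by
      cases cs
      · rfl
      · simp at h
    subst hcs
    rw [pvSplitC_nil_case [] (by simp)]
    simp [pvLoopA, pvLoopB, pvLoB]
  | succ n ih =>
    intro cs h i
    match cs with
    | [] =>
      rw [pvSplitC_nil_case [] (by simp)]
      simp [pvLoopA, pvLoopB, pvLoB]
    | c0 :: cs0 =>
      rw [pvLoopA_step]
      rcases hr : (c0 :: cs0).dropWhile (fun c => !(c == ',')) with _ | ⟨x, r'⟩
      · have hdd : ((c0 :: cs0).dropWhile pvWs).dropWhile (fun c => !(c == ',')) = [] := by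
          rw [dropWhile_dropWhile pvWs _ pvWs_nc]; exact hr
        rw [hdd, pvSplitC_nil_case _ hr]
        simp only [pvLoopB, pvLoB_eq, drop_len_takeWhile_comm pvWs _ pvWs_nc,
          takeWhile_takeWhile pvWs _ pvWs_nc, ← pvTrimA_eq]
      · have hx : x = ',' := by simpa using dropWhile_head_false _ _ _ _ hr
        subst hx
        have hdd : ((c0 :: cs0).dropWhile pvWs).dropWhile (fun c => !(c == ',')) = ',' :: r' := by
          rw [dropWhile_dropWhile pvWs _ pvWs_nc]; exact hr
        rw [hdd, pvSplitC_cons_case _ _ _ hr]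
        have hlen : r'.length ≤ n := by
          have hsum := congrArg List.length
            ((c0 :: cs0).takeWhile_append_dropWhile (p := fun c => !(c == ',')))
          rw [List.length_append, hr] at hsum
          simp only [List.length_cons] at h hsum
          omega
        simp only [pvLoopB, pvLoB_eq, drop_len_takeWhile_comm pvWs _ pvWs_nc,
          takeWhile_takeWhile pvWs _ pvWs_nc, ← pvTrimA_eq, ih r' hlen]
        have hsplit := congrArg List.length (takeWhile_split pvWs _ pvWs_nc (c0 :: cs0))
        rw [List.length_append] at hsplit
        rw [hsplit]
        simp [Nat.add_assoc]

-- ===== VERDICT (by name: the statement is the Claim_ definition above) =====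
theorem tag_ranges_py_spec : Claim_equal_tag_ranges_py := by
  intro text _
  unfold Spec_tag_ranges_py tag_ranges_py tag_ranges_py_alt
  rw [pvSplitOn_comma]
  exact pvMain text.toList.length text.toList (le_refl _) 0
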